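-- pv_equiv track=rewrite | github.com/wonju-dev/codingTestStudy | 2022 토스 코테/1.py | solution
-- ===== SOURCE A (Python) =====
-- def solution(s):
--     biggest = -1
--     for i in range(len(s)-2):
--         if s[i] == s[i+1] == s[i+2]:
--             substring = int(s[i:i+3])
--             if substring > biggest:
--                 biggest = substring
--
--     return biggest
-- ===== SOURCE B (Python) =====
-- def solution(s):
--     # Search for each possible triple "ddd" from the largest digit down;
--     # the first one found gives the maximum 3-digit value (= 111 * d).
--     for d in "9876543210":
--         if d * 3 in s:
--             return 111 * int(d)
--     return -1
-- ===== Notes on version B (the rewrite author's own statement) =====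
-- stated objective: faster
-- what changed: Instead of scanning every index for a window of three equal characters and parsing each hit with int(), B searches the string for the ten candidate triple-digit substrings (a digit repeated three times, from 9 down to 0) and returns 111*d for the first digit d found, which is the maximum; the per-character Python-level loop disappears in favour of at most ten C-level substring searches.
-- outside the precondition, e.g. on solution('+++'): A raises ValueError, B returns -1
import Mathlib
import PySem

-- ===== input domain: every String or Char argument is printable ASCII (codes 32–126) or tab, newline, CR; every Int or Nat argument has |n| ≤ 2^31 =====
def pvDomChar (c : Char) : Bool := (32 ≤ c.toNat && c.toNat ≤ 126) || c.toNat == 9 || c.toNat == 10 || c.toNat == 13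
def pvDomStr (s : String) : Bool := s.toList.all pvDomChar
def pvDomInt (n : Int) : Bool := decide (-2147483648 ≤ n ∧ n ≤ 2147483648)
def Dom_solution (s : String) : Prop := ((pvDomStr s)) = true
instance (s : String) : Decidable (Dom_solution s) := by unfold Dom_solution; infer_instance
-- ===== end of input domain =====

-- B replaces A's per-index window scan by ten substring searches (a digit repeated thrice) from the
-- largest digit down (first hit is the maximum); equivalence is about the return value.

-- ===== PORT A =====
def solution (s : String) : Int :=
  (PySem.List.pyRange 0 ((s.toList.length : Int) - 2) 1).foldl
    (fun biggest i =>
      match PySem.List.pyGet? s.toList i, PySem.List.pyGet? s.toList (i + 1),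
            PySem.List.pyGet? s.toList (i + 2) with
      | some a, some b, some c =>
        if a = b ∧ b = c then
          match PySem.Int.ofChars? (PySem.List.slice s.toList (some i) (some (i + 3))) with
          | some v => if v > biggest then v else biggest
          | none => biggest   -- int() raises ValueError here; excluded by Pre_solution
        else biggest
      | _, _, _ => biggest)   -- unreachable: i < len(s) - 2
    (-1)

-- ===== PORT B =====
def pvTry : List Char → String → Int
  | [], _ => -1
  | d :: ds, s =>
    if PySem.Str.isIn (String.ofList [d, d, d]) s then
      match PySem.Int.ofChars? [d] with
      | some v => 111 * v
      | none => 0   -- unreachable: d is a digit literal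
    else pvTry ds s

def solution_alt (s : String) : Int :=
  pvTry ['9', '8', '7', '6', '5', '4', '3', '2', '1', '0'] s

-- ===== PRECONDITION & SPEC =====
def pvTripleOk : List Char → Bool
  | [a, b, c] => !(a == b && b == c) || a.isDigit
  | _ => true

-- Pre_ excludes exactly the strings containing three consecutive equal non-digit
-- characters, on which A's int() raises ValueError (A returns on every other input).
def Pre_solution (s : String) : Prop :=
  ∀ i ∈ List.range s.toList.length, pvTripleOk ((s.toList.drop i).take 3) = true
instance (s : String) : Decidable (Pre_solution s) := by unfold Pre_solution; infer_instance

def pvWitness_solution : String := "ab777cc"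

def Spec_solution (s : String) (out : Int) : Prop := out = solution_alt s
instance (s : String) (out : Int) : Decidable (Spec_solution s out) := by unfold Spec_solution; infer_instance

-- ===== CLAIM (what is proved, stated in full; the proofs are below) =====
def Claim_equal_solution : Prop := ∀ (s : String), Dom_solution s → Pre_solution s → Spec_solution s (solution s)

-- ===== LEMMAS AND PROOFS =====

-- value of the three-digit number "ccc" for a digit character c
def pvVal (c : Char) : Int := 111 * ((c.toNat : Int) - 48)

-- heads of the equal-triple windows of a list, in order
def pvHeads : List Char → List Char
  | a :: b :: c :: t => if a = b ∧ b = c then a :: pvHeads (b :: c :: t) else pvHeads (b :: c :: t)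
  | _ => []
termination_by cs => cs.length
decreasing_by all_goals (simp only [List.length_cons]; omega)

-- one iteration of A's loop, phrased on the dropped suffix
def pvStep (cs : List Char) (acc : Int) : Int :=
  match cs with
  | a :: b :: c :: _ =>
    if a = b ∧ b = c then
      match PySem.Int.ofChars? [a, b, c] with
      | some v => if v > acc then v else acc
      | none => acc
    else acc
  | _ => acc

-- A's loop as a structural recursion
def pvGA : List Char → Int → Int
  | a :: b :: c :: t, acc => pvGA (b :: c :: t) (pvStep (a :: b :: c :: t) acc)
  | _, acc => acc
termination_by cs => cs.length
decreasing_by all_goals (simp only [List.length_cons]; omega)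

-- descending scan over candidate digits, tested by membership in the triple heads
def pvScanMem : List Char → List Char → Int
  | [], _ => -1
  | d :: ds, H => if d ∈ H then pvVal d else pvScanMem ds H

lemma pvDigit_cases (a : Char) (h : a.isDigit = true) :
    a = '0' ∨ a = '1' ∨ a = '2' ∨ a = '3' ∨ a = '4' ∨ a = '5' ∨ a = '6' ∨ a = '7' ∨ a = '8' ∨ a = '9' := by
  have hb : 48 ≤ a.toNat ∧ a.toNat ≤ 57 := by
    simp [Char.isDigit, UInt32.le_iff_toNat_le] at h
    exact ⟨h.1, h.2⟩
  have hofn : Char.ofNat a.toNat = a := Char.ofNat_toNat a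
  have : a.toNat = 48 ∨ a.toNat = 49 ∨ a.toNat = 50 ∨ a.toNat = 51 ∨ a.toNat = 52 ∨ a.toNat = 53 ∨ a.toNat = 54 ∨ a.toNat = 55 ∨ a.toNat = 56 ∨ a.toNat = 57 := by omega
  rcases this with h'|h'|h'|h'|h'|h'|h'|h'|h'|h' <;> rw [h'] at hofn <;>
    first
    | exact Or.inl (hofn ▸ rfl)
    | (rw [← hofn]; decide)

lemma pvOfChars_triple (a : Char) (h : a.isDigit = true) :
    PySem.Int.ofChars? [a, a, a] = some (pvVal a) := by
  rcases pvDigit_cases a h with h'|h'|h'|h'|h'|h'|h'|h'|h'|h' <;> subst h' <;> decide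

lemma pvOfChars_single (a : Char) (h : a.isDigit = true) :
    PySem.Int.ofChars? [a] = some ((a.toNat : Int) - 48) := by
  rcases pvDigit_cases a h with h'|h'|h'|h'|h'|h'|h'|h'|h'|h' <;> subst h' <;> decide

lemma pvDigit_mem (a : Char) (h : a.isDigit = true) :
    a ∈ ['9', '8', '7', '6', '5', '4', '3', '2', '1', '0'] := by
  rcases pvDigit_cases a h with h'|h'|h'|h'|h'|h'|h'|h'|h'|h' <;> subst h' <;> decide

lemma pvVal_nonneg (a : Char) (h : a.isDigit = true) : 0 ≤ pvVal a := by
  rcases pvDigit_cases a h with h'|h'|h'|h'|h'|h'|h'|h'|h'|h' <;> subst h' <;> decide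

-- membership in pvHeads is exactly "ccc occurs as a contiguous substring"
lemma pvHeads_short (cs : List Char) (h : cs.length < 3) : pvHeads cs = [] := by
  match cs, h with
  | [], _ => rw [pvHeads] <;> (intro a b c t hh; simp at hh)
  | [a], _ => rw [pvHeads] <;> (intro a b c t hh; simp at hh)
  | [a, b], _ => rw [pvHeads] <;> (intro a b c t hh; simp at hh)

lemma pvHeads_mem (cs : List Char) (x : Char) :
    x ∈ pvHeads cs ↔ [x, x, x] <:+: cs := by
  induction cs using pvHeads.induct with
  | case1 a b c t hab ih =>
    rw [pvHeads, if_pos hab, List.infix_cons_iff]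
    obtain ⟨h1, h2⟩ := hab
    subst h1; subst h2
    constructor
    · intro hx
      rcases List.mem_cons.mp hx with rfl | hx
      · exact Or.inl (by simp [List.cons_prefix_cons])
      · exact Or.inr (ih.mp hx)
    · rintro (hpre | hinf)
      · simp [List.cons_prefix_cons] at hpre
        exact List.mem_cons.mpr (Or.inl hpre)
      · exact List.mem_cons.mpr (Or.inr (ih.mpr hinf))
  | case2 a b c t hab ih =>
    rw [pvHeads, if_neg hab, List.infix_cons_iff]
    constructor
    · intro hx; exact Or.inr (ih.mp hx)
    · rintro (hpre | hinf)
      · exfalso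
        simp [List.cons_prefix_cons] at hpre
        obtain ⟨r1, r2, r3⟩ := hpre
        exact hab ⟨r1.symm.trans r2, r2.symm.trans r3⟩
      · exact ih.mpr hinf
  | case3 cs h =>
    have hlen : cs.length < 3 := by
      match cs with
      | [] => simp
      | [a] => simp
      | [a, b] => simp
      | a :: b :: c :: t => exact (h a b c t rfl).elim
    rw [pvHeads_short cs hlen]
    simp only [List.not_mem_nil, false_iff]
    intro hinf
    have := hinf.length_le
    simp at this
    omega

-- A = range fold of pvStep
lemma pvA_eq_range_fold (s : String) :
    solution s = (List.range (s.toList.length - 2)).foldl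
      (fun acc k => pvStep (s.toList.drop k) acc) (-1) := by
  unfold solution
  rw [PySem.List.pyRange_one, List.foldl_map]
  have hn : ((s.toList.length : Int) - 2 - 0).toNat = s.toList.length - 2 := by omega
  rw [hn]
  apply PySem.List.foldl_congr_mem'
  intro k hk acc
  simp only [List.mem_range] at hk
  set cs := s.toList with hcs
  have h3 : 3 ≤ (cs.drop k).length := by simp [List.length_drop]; omega
  rcases e : cs.drop k with _ | ⟨a, _ | ⟨b, _ | ⟨c, t⟩⟩⟩ <;> rw [e] at h3 <;> simp at h3
  have g0 : cs[k]? = some a := by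
    have : (cs.drop k)[0]? = cs[k+0]? := List.getElem?_drop
    rw [e] at this; simpa using this.symm
  have g1 : cs[k+1]? = some b := by
    have : (cs.drop k)[1]? = cs[k+1]? := List.getElem?_drop
    rw [e] at this; simpa using this.symm
  have g2 : cs[k+2]? = some c := by
    have : (cs.drop k)[2]? = cs[k+2]? := List.getElem?_drop
    rw [e] at this; simpa using this.symm
  have c1 : ((k:Int) + 1) = ((k+1 : Nat) : Int) := by push_cast; ring
  have c2 : ((k:Int) + 2) = ((k+2 : Nat) : Int) := by push_cast; ring
  have c3 : ((k:Int) + 3) = ((k+3 : Nat) : Int) := by push_cast; ring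
  have hslice : PySem.List.slice cs (some ((k:Int))) (some ((k:Int) + 3)) = [a, b, c] := by
    rw [c3, PySem.List.slice_natCast]
    have : k + 3 - k = 3 := by omega
    rw [this, e]
    simp
  simp only [zero_add, c1, c2, PySem.List.pyGet?_natCast, g0, g1, g2, hslice, pvStep]

-- range fold of pvStep = pvGA
lemma pvRange_fold_eq_gA (cs : List Char) (acc : Int) :
    (List.range (cs.length - 2)).foldl (fun acc k => pvStep (cs.drop k) acc) acc = pvGA cs acc := by
  induction cs, acc using pvGA.induct with
  | case1 a b c t acc ih =>
    have hlen : (a :: b :: c :: t).length - 2 = t.length + 1 := by simp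
    rw [hlen, List.range_succ_eq_map, List.foldl_cons, List.foldl_map, pvGA]
    have hbody : ∀ (acc : Int) (k : Nat),
        pvStep ((a :: b :: c :: t).drop k.succ) acc = pvStep ((b :: c :: t).drop k) acc := by
      intro acc k; rfl
    simp only [List.drop_zero, hbody]
    simpa [List.length_cons] using ih
  | case2 x acc h =>
    have hlen : x.length - 2 = 0 := by
      match x with
      | [] => simp
      | [a] => simp
      | [a, b] => simp
      | a :: b :: c :: t => exact (h a b c t rfl).elim
    rw [hlen]
    rw [pvGA]
    · simp
    · intro a b c t hh
      exact h a b c t hh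

-- under the digit hypothesis, pvGA is the running max of pvVal over pvHeads
lemma pvGA_eq_fold_max (cs : List Char) (acc : Int)
    (h : ∀ c ∈ pvHeads cs, c.isDigit = true) :
    pvGA cs acc = (pvHeads cs).foldl (fun acc c => max acc (pvVal c)) acc := by
  induction cs, acc using pvGA.induct with
  | case1 a b c t acc ih =>
    rw [pvGA]
    by_cases hab : a = b ∧ b = c
    · obtain ⟨h1, h2⟩ := hab
      subst h1; subst h2
      rw [pvHeads, if_pos ⟨rfl, rfl⟩] at h ⊢
      have hda : a.isDigit = true := h a (List.mem_cons_self ..)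
      have hstep : pvStep (a :: a :: a :: t) acc = max acc (pvVal a) := by
        simp [pvStep, pvOfChars_triple a hda]
        split_ifs with hgt
        · exact (max_eq_right (le_of_lt hgt)).symm
        · exact (max_eq_left (by omega)).symm
      have := ih (fun c hc => h c (List.mem_cons_of_mem _ hc))
      rw [hstep] at this
      rw [List.foldl_cons, hstep]
      exact this
    · rw [pvHeads, if_neg hab] at h ⊢
      have hstep : pvStep (a :: b :: c :: t) acc = acc := by
        simp only [pvStep, if_neg hab]
      have := ih h
      rw [hstep] at this
      rw [hstep]
      exact this
  | case2 x acc hx =>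
    have : pvHeads x = [] := by
      rw [pvHeads]
      · intro a b c t hh; exact hx a b c t hh
    rw [this, pvGA]
    · simp
    · intro a b c t hh; exact hx a b c t hh

-- B = descending membership scan over the heads
lemma pvTry_eq_scan (ds : List Char) (hds : ∀ d ∈ ds, d.isDigit = true) (s : String) :
    pvTry ds s = pvScanMem ds (pvHeads s.toList) := by
  induction ds with
  | nil => simp [pvTry, pvScanMem]
  | cons d ds ih =>
    have hd : d.isDigit = true := hds d (List.mem_cons_self ..)
    rw [pvTry, pvScanMem]
    have hiff : (PySem.Str.isIn (String.ofList [d, d, d]) s = true) ↔ d ∈ pvHeads s.toList := by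
      rw [PySem.Str.isIn_iff_infix, pvHeads_mem]
      simp
    by_cases hmem : d ∈ pvHeads s.toList
    · rw [if_pos (hiff.mpr hmem), if_pos hmem, pvOfChars_single d hd]
      simp [pvVal]
    · rw [if_neg (fun hh => hmem (hiff.mp hh)), if_neg hmem]
      exact ih (fun x hx => hds x (List.mem_cons_of_mem _ hx))

lemma pvFold_max_eq_scan (H : List Char) (ds : List Char) (hds : ∀ d ∈ ds, d.isDigit = true)
    (hcover : ∀ c ∈ H, c ∈ ds)
    (hsort : ds.Pairwise (fun x y => pvVal y ≤ pvVal x)) :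
    H.foldl (fun acc c => max acc (pvVal c)) (-1) = pvScanMem ds H := by
  induction ds with
  | nil =>
    have : H = [] := List.eq_nil_iff_forall_not_mem.mpr
      (fun c hc => by simpa using hcover c hc)
    simp [this, pvScanMem]
  | cons d ds ih =>
    rw [pvScanMem]
    by_cases hmem : d ∈ H
    · rw [if_pos hmem, ← List.foldl_map]
      have hd : d.isDigit = true := hds d (List.mem_cons_self ..)
      have hle1 : pvVal d ≤ (H.map pvVal).foldl max (-1) :=
        (PySem.List.le_foldl_max _ _).2 _ (List.mem_map_of_mem hmem)
      rcases PySem.List.foldl_max_mem (H.map pvVal) (-1) with heq | hmm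
      · exfalso
        have h0 : 0 ≤ pvVal d := pvVal_nonneg d hd
        rw [heq] at hle1
        omega
      · obtain ⟨c, hcH, hval⟩ := List.mem_map.mp hmm
        have hcd : pvVal c ≤ pvVal d := by
          rcases List.mem_cons.mp (hcover c hcH) with rfl | hcds
          · exact le_refl _
          · exact (List.pairwise_cons.mp hsort).1 c hcds
        rw [← hval] at hle1 ⊢
        exact le_antisymm hcd hle1
    · rw [if_neg hmem]
      exact ih (fun x hx => hds x (List.mem_cons_of_mem _ hx))
        (fun c hc => (List.mem_cons.mp (hcover c hc)).resolve_left (by rintro rfl; exact hmem hc))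
        (List.Pairwise.sublist (List.sublist_cons_self _ _) hsort)

lemma pvPre_heads (s : String) (hp : Pre_solution s) :
    ∀ c ∈ pvHeads s.toList, c.isDigit = true := by
  intro c hc
  have hinf : [c, c, c] <:+: s.toList := (pvHeads_mem _ _).mp hc
  have hin : PySem.Chars.isIn [c, c, c] s.toList = true :=
    (PySem.Chars.isIn_iff_infix _ _).mpr hinf
  obtain ⟨j, hpre⟩ := (PySem.Chars.exists_prefix_drop_iff_isIn _ _).mpr hin
  have hj : j < s.toList.length := by
    by_contra hge
    rw [List.drop_eq_nil_of_le (by omega)] at hpre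
    simp [List.prefix_nil] at hpre
  have htake : (s.toList.drop j).take 3 = [c, c, c] := by
    obtain ⟨tl, htl⟩ := hpre
    rw [← htl]
    simp
  have := hp j (List.mem_range.mpr hj)
  rw [htake] at this
  simpa [pvTripleOk] using this

-- ===== VERDICT (by name: the statement is the Claim_ definition above) =====
set_option maxRecDepth 8192 in
theorem solution_spec : Claim_equal_solution := by
  intro s _ hp
  unfold Spec_solution
  have hdig := pvPre_heads s hp
  rw [pvA_eq_range_fold, pvRange_fold_eq_gA, pvGA_eq_fold_max _ _ hdig]
  unfold solution_alt
  rw [pvTry_eq_scan _ (by simp)]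
  exact pvFold_max_eq_scan _ _ (by simp)
    (fun c hc => pvDigit_mem c (hdig c hc)) (by simp [pvVal])
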